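-- pv_equiv track=rewrite | github.com/pypi-data/pypi-mirror-348 | packages/itensorpy/itensorpy-0.3.1-py3-none-any.whl/itensorpy/tensor_ops/einsum.py | parse_einsum_pairs
-- ===== SOURCE A (Python) =====
-- from collections import defaultdict
--
-- def parse_einsum_pairs(input_notations, output_notation):
--
--     # 1) obliczamy offsety, czyli od jakiego numeru zaczyna się każda tablica
--     offsets = []
--     off = 0
--     for labels in input_notations:
--         offsets.append(off)
--         off += len(labels)
--
--     # 2) zliczamy wszystkie wystąpienia każdej litery
--     occ = defaultdict(list)  # letter -> [ (tensor_idx, pos_in_tensor), ... ]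
--     for tensor_idx, labels in enumerate(input_notations):
--         for pos, letter in enumerate(labels):
--             occ[letter].append((tensor_idx, pos))
--
--     # 3) każdy letter, który występuje dokładnie dwa razy i nie jest w output, kontraktujemy
--     pairs = []
--     for letter, locs in occ.items():
--         if len(locs) == 2 and letter not in output_notation:
--             (t1, p1), (t2, p2) = locs
--             axis1 = offsets[t1] + p1
--             axis2 = offsets[t2] + p2
--             pairs.append((axis1, axis2))
--
--     return pairs
-- ===== SOURCE B (Python) =====
-- def parse_einsum_pairs(input_notations, output_notation):
--     # Each global axis is a position in the concatenation of all input notations: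
--     # no offsets list and no occurrence dict, just index arithmetic on one string.
--     S = "".join(input_notations)
--     pairs = []
--     for i, c in enumerate(S):
--         if S.index(c) == i and S.count(c) == 2 and c not in output_notation:
--             pairs.append((i, S.index(c, i + 1)))
--     return pairs
-- ===== Notes on version B (the rewrite author's own statement) =====
-- stated objective: simpler
-- what changed: B concatenates all notations into one string and scans its positions, emitting a pair at each first occurrence whose letter occurs exactly twice and is absent from the output, using str.index/str.count instead of A's offsets list and occurrence dictionary.
import Mathlib
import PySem

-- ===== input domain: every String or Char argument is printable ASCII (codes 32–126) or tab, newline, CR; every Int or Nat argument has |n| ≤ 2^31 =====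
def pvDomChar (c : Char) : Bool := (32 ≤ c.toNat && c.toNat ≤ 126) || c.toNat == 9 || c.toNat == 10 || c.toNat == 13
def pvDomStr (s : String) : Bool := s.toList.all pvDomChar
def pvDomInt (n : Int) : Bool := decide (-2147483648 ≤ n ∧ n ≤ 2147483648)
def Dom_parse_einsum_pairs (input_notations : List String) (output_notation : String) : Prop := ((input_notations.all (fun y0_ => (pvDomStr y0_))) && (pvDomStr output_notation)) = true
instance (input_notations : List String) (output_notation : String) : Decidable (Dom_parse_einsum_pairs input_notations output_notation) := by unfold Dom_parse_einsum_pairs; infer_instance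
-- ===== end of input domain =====

-- B replaces A's offsets list and occurrence dictionary by direct index arithmetic on the
-- concatenation of all notations (simpler, not faster); both return the same pair list.

-- ===== PORT A =====
-- literal transliteration of A: offsets loop, occurrence dict (defaultdict(list)), final items loop.
def parse_einsum_pairs (input_notations : List String) (output_notation : String) : List (Int × Int) :=
  -- 1) offsets
  let st := input_notations.foldl
    (fun (st : List Int × Int) labels => (st.1 ++ [st.2], st.2 + PySem.Str.len labels)) ([], 0)
  let offsets := st.1
  -- 2) occ : letter -> [(tensor_idx, pos), ...]; defaultdict append = insert (getD ++ [·])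
  let occ : PySem.Dict Char (List (Int × Int)) :=
    (PySem.List.enumerate input_notations).foldl
      (fun occ ti =>
        (PySem.List.enumerate ti.2.toList).foldl
          (fun occ pl => occ.insert pl.2 (occ.getD pl.2 [] ++ [(ti.1, pl.1)])) occ)
      PySem.Dict.empty
  -- 3) pairs; offsets[t] never misses in Python (t indexes input_notations), so the getD 0
  -- default of pyGet? is unreachable
  occ.items.foldl
    (fun pairs lv =>
      if lv.2.length == 2 && !(PySem.Chars.isIn [lv.1] output_notation.toList) then
        match lv.2 with
        | [(t1, p1), (t2, p2)] =>
            pairs ++ [((PySem.List.pyGet? offsets t1).getD 0 + p1,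
                       (PySem.List.pyGet? offsets t2).getD 0 + p2)]
        | _ => pairs
      else pairs) []

-- ===== PORT B =====
-- literal transliteration of B: one scan of the concatenated string; S.index(c) / S.count(c) /
-- S.index(c, i+1) are Chars.find / Chars.count / Chars.findFrom (index's ValueError = find's -1,
-- unreachable under the guard).
def parse_einsum_pairs_alt (input_notations : List String) (output_notation : String) : List (Int × Int) :=
  let s := (PySem.Str.join "" input_notations).toList
  (PySem.List.enumerate s).foldl
    (fun pairs ic =>
      if (PySem.Chars.find s [ic.2] == ic.1) && (PySem.Chars.count s [ic.2] == 2)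
          && !(PySem.Chars.isIn [ic.2] output_notation.toList) then
        pairs ++ [(ic.1, PySem.Chars.findFrom s [ic.2] (ic.1 + 1))]
      else pairs) []

-- ===== PRECONDITION & SPEC =====
def Spec_parse_einsum_pairs (input_notations : List String) (output_notation : String) (out : List (Int × Int)) : Prop := out = parse_einsum_pairs_alt input_notations output_notation
instance (input_notations : List String) (output_notation : String) (out : List (Int × Int)) : Decidable (Spec_parse_einsum_pairs input_notations output_notation out) := by unfold Spec_parse_einsum_pairs; infer_instance

-- ===== CLAIM (what is proved, stated in full; the proofs are below) =====
def Claim_equal_parse_einsum_pairs : Prop := ∀ (input_notations : List String) (output_notation : String), Dom_parse_einsum_pairs input_notations output_notation → Spec_parse_einsum_pairs input_notations output_notation (parse_einsum_pairs input_notations output_notation)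

-- ===== LEMMAS AND PROOFS =====

def pvOccs (c : Char) : List Char → Int → List Int
  | [], _ => []
  | d :: t, k => if d == c then k :: pvOccs c t (k + 1) else pvOccs c t (k + 1)

theorem pvOccs_append (c : Char) (u v : List Char) (k : Int) :
    pvOccs c (u ++ v) k = pvOccs c u k ++ pvOccs c v (k + u.length) := by
  induction u generalizing k with
  | nil => simp [pvOccs]
  | cons d t ih =>
    simp only [List.cons_append, pvOccs, ih, List.length_cons]
    split <;> (push_cast; ring_nf) <;> simp [List.cons_append]
theorem pvOccs_bounds (c : Char) (l : List Char) (k : Int) :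
    ∀ m ∈ pvOccs c l k, k ≤ m ∧ m < k + l.length := by
  induction l generalizing k with
  | nil => simp [pvOccs]
  | cons d t ih =>
    intro m hm
    simp only [pvOccs] at hm
    split at hm
    · rcases List.mem_cons.1 hm with h | h
      · subst h; simp only [List.length_cons]; push_cast; omega
      · have := ih (k+1) m h; simp only [List.length_cons]; push_cast; omega
    · have := ih (k+1) m hm; simp only [List.length_cons]; push_cast; omega
theorem pvOccs_shift (c : Char) (l : List Char) (k d : Int) :
    pvOccs c l (k + d) = (pvOccs c l k).map (· + d) := by
  induction l generalizing k with
  | nil => simp [pvOccs]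
  | cons e t ih =>
    simp only [pvOccs]
    split
    · simp [← ih]; ring_nf
    · rw [show k + d + 1 = (k + 1) + d by ring, ih]
theorem pvOccs_nil_iff (c : Char) (l : List Char) (k : Int) :
    pvOccs c l k = [] ↔ c ∉ l := by
  induction l generalizing k with
  | nil => simp [pvOccs]
  | cons d t ih =>
    simp only [pvOccs]
    split
    · rename_i h; simp_all [eq_of_beq h]
    · rename_i h; simp at h; simp [ih, h, Ne.symm h]
theorem pvOccs_length (c : Char) (l : List Char) (k : Int) :
    (pvOccs c l k).length = l.count c := by
  induction l generalizing k with
  | nil => simp [pvOccs]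
  | cons d t ih =>
    simp only [pvOccs, List.count_cons]
    split <;> rename_i h <;> simp_all [ih]
theorem pvOccs_pairwise (c : Char) (l : List Char) (k : Int) :
    (pvOccs c l k).Pairwise (· < ·) := by
  induction l generalizing k with
  | nil => simp [pvOccs]
  | cons d t ih =>
    simp only [pvOccs]
    split
    · refine List.Pairwise.cons ?_ (ih (k+1))
      intro m hm; have := pvOccs_bounds c t (k+1) m hm; omega
    · exact ih (k+1)
theorem pvFind_go (c : Char) (l : List Char) (k : Nat) :
    PySem.Chars.find.go [c] l k = (pvOccs c l (k : Int)).headD (-1) := by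
  induction l generalizing k with
  | nil => simp [PySem.Chars.find.go, pvOccs, List.isPrefixOf]
  | cons d t ih =>
    rw [PySem.Chars.find.go.eq_2]
    simp only [List.isPrefixOf, pvOccs, Bool.and_true]
    by_cases h : c == d
    · simp only [h, (beq_iff_eq ..).1 h, beq_self_eq_true, if_true, List.headD_cons]
    · have hd : (d == c) = false := by
        simp at h ⊢; exact fun e => h e.symm
      simp only [h, hd, Bool.false_and, if_false, ih (k+1)]
      norm_cast
theorem pvFind_eq (c : Char) (l : List Char) :
    PySem.Chars.find l [c] = (pvOccs c l 0).headD (-1) := by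
  simpa using pvFind_go c l 0
theorem pvCount_go (c : Char) (fuel : Nat) (l : List Char) (acc : Nat)
    (h : l.length ≤ fuel) : PySem.Chars.count.go [c] fuel l acc = acc + l.count c := by
  induction fuel generalizing l acc with
  | zero =>
    interval_cases hl : l.length
    · simp [List.length_eq_zero_iff.1 hl, PySem.Chars.count.go]
  | succ n ih =>
    cases l with
    | nil => simp [PySem.Chars.count.go]
    | cons d t =>
      rw [PySem.Chars.count.go.eq_def]
      simp only [List.isPrefixOf, Bool.and_true, List.length_cons, List.length_singleton,
        List.drop_one, List.tail_cons, List.count_cons]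
      by_cases hcd : c == d
      · rw [if_pos hcd, show List.drop ([].length + 1) (d :: t) = t by simp,
          ih t (acc+1) (by simpa using h), (beq_iff_eq ..).1 hcd]
        simp [Nat.add_comm, Nat.add_assoc, Nat.add_left_comm]
      · have hdc : (d == c) = false := by
          simp at hcd ⊢; exact fun e => hcd e.symm
        rw [if_neg (by simpa using hcd), ih t acc (by simpa using h)]
        simp [hdc]

theorem pvCount_eq (c : Char) (l : List Char) :
    PySem.Chars.count l [c] = l.count c := by
  simp only [PySem.Chars.count, List.isEmpty_cons, Bool.false_eq_true, if_false]
  simpa using pvCount_go c l.length l 0 le_rfl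
theorem pvIsIn_eq (c : Char) (l : List Char) :
    PySem.Chars.isIn [c] l = l.contains c := by
  simp only [PySem.Chars.isIn, pvFind_eq]
  rcases hl : pvOccs c l 0 with _ | ⟨m, rest⟩
  · have : c ∉ l := (pvOccs_nil_iff c l 0).1 hl
    simp [this]
  · have hne : c ∈ l := by
      by_contra hc
      rw [(pvOccs_nil_iff c l 0).2 hc] at hl; cases hl
    have hb := pvOccs_bounds c l 0 m (by rw [hl]; exact List.mem_cons_self ..)
    simp only [List.headD_cons]
    have : (m != -1) = true := by simp; omega
    simp [this, hne]

def pvCsum : List String → Nat → Int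
  | _, 0 => 0
  | [], _ + 1 => 0
  | lab :: t, j + 1 => (lab.toList.length : Int) + pvCsum t j

def pvOffs : List String → Int → List Int
  | [], _ => []
  | lab :: t, k => k :: pvOffs t (k + (lab.toList.length : Int))

theorem pvEnum_filter_map (c : Char) (l : List Char) (k : Int) :
    ((PySem.List.enumerate l k).filter (fun ic => ic.2 == c)).map Prod.fst = pvOccs c l k := by
  induction l generalizing k with
  | nil => simp [PySem.List.enumerate_nil, pvOccs]
  | cons d t ih =>
    rw [PySem.List.enumerate_cons]
    by_cases h : d == c
    · simp only [pvOccs, List.filter_cons, h, if_pos, List.map_cons, List.map]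
      simp [ih]
    · simp only [pvOccs, List.filter_cons, h, if_neg, List.map_cons, List.map]
      simp [ih, h]

theorem pvEnum_mem (l : List Char) (k : Int) :
    ∀ ic ∈ PySem.List.enumerate l k, ic.2 ∈ l ∧ k ≤ ic.1 ∧ ic.1 < k + l.length := by
  induction l generalizing k with
  | nil => simp [PySem.List.enumerate_nil]
  | cons d t ih =>
    intro ic hic
    rw [PySem.List.enumerate_cons] at hic
    rcases List.mem_cons.1 hic with h | h
    · subst h
      refine ⟨by simp, le_refl _, ?_⟩
      simp only [List.length_cons]; push_cast; omega
    · have := ih (k+1) ic h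
      refine ⟨List.mem_cons_of_mem _ this.1, by omega, ?_⟩
      simp only [List.length_cons]; push_cast; omega

theorem pvEnum_map_swap (l : List Char) (b k : Int) :
    (PySem.List.enumerate l k).map (fun pl => (pl.2, b + pl.1))
      = (PySem.List.enumerate l (b + k)).map (fun ic => (ic.2, ic.1)) := by
  induction l generalizing k with
  | nil => simp [PySem.List.enumerate_nil]
  | cons d t ih =>
    rw [PySem.List.enumerate_cons, PySem.List.enumerate_cons]
    simp only [List.map_cons]
    rw [ih (k+1)]
    ring_nf

theorem pvLoop1 (ins : List String) (acc : List Int) (k : Int) :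
    ins.foldl (fun (st : List Int × Int) labels => (st.1 ++ [st.2], st.2 + PySem.Str.len labels)) (acc, k)
      = (acc ++ pvOffs ins k, k + pvCsum ins ins.length) := by
  induction ins generalizing acc k with
  | nil => simp [pvOffs, pvCsum]
  | cons lab t ih =>
    simp only [List.foldl_cons]
    rw [ih, Prod.mk.injEq]
    simp only [pvOffs, pvCsum, List.length_cons, PySem.Str.len_eq]
    exact ⟨by simp, by ring⟩

theorem pvOffs_get (ins : List String) (k : Int) (j : Nat) (hj : j < ins.length) :
    PySem.List.pyGet? (pvOffs ins k) (j : Int) = some (k + pvCsum ins j) := by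
  induction ins generalizing k j with
  | nil => simp at hj
  | cons lab t ih =>
    cases j with
    | zero => simp [pvOffs, PySem.List.pyGet?_natCast, pvCsum]
    | succ m =>
      rw [pvOffs, PySem.List.pyGet?_natCast]
      simp only [List.getElem?_cons_succ]
      rw [← PySem.List.pyGet?_natCast, ih _ m (by simpa using hj), pvCsum]
      congr 1; ring

def pvFlat (ins : List String) (t0 : Int) : List (Char × (Int × Int)) :=
  (PySem.List.enumerate ins t0).flatMap
    (fun ti => (PySem.List.enumerate ti.2.toList).map (fun pl => (pl.2, (ti.1, pl.1))))

def pvTr (offsets : List Int) (x : Int × Int) : Int :=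
  (PySem.List.pyGet? offsets x.1).getD 0 + x.2

def pvGrp (L : List (Char × (Int × Int))) : PySem.Dict Char (List (Int × Int)) :=
  L.foldl (fun d kv => d.insert kv.1 (d.getD kv.1 [] ++ [kv.2])) PySem.Dict.empty

theorem pvGrp_getD (L : List (Char × (Int × Int))) (c : Char) :
    (pvGrp L).getD c [] = (L.filter (fun kv => kv.1 == c)).map Prod.snd := by
  induction L using List.reverseRecOn with
  | nil => simp [pvGrp, PySem.Dict.getD_of_not_contains, PySem.Dict.contains_empty]
  | append_singleton L kv ih =>
    have : pvGrp (L ++ [kv]) = (pvGrp L).insert kv.1 ((pvGrp L).getD kv.1 [] ++ [kv.2]) := by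
      simp [pvGrp, List.foldl_append]
    rw [this, PySem.Dict.getD_insert]
    by_cases h : c = kv.1
    · subst h
      simp [ih, List.filter_append, List.map_append]
    · simp [h, ih, List.filter_append, (by simpa using Ne.symm h : (kv.1 == c) = false)]

theorem pvGrp_keys (L : List (Char × (Int × Int))) :
    (pvGrp L).keys = PySem.Set.ofList (L.map Prod.fst) := by
  have h := PySem.Dict.keys_foldl_insert_key L Prod.fst
    (fun d kv => d.getD kv.1 [] ++ [kv.2]) PySem.Dict.empty
  simpa [pvGrp, PySem.Dict.keys_empty, PySem.Set.ofList, PySem.Set.update] using h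

theorem pvGrp_nodup (L : List (Char × (Int × Int))) : (pvGrp L).keys.Nodup := by
  exact PySem.Dict.nodup_keys_foldl_insert_key L Prod.fst _ _
    (by simp [PySem.Dict.keys_empty])

theorem pvGrp_items (L : List (Char × (Int × Int))) :
    (pvGrp L).items = (PySem.Set.ofList (L.map Prod.fst)).map
      (fun c => (c, (L.filter (fun kv => kv.1 == c)).map Prod.snd)) := by
  rw [PySem.Dict.items_eq_map_keys _ (pvGrp_nodup L) []]
  rw [pvGrp_keys]
  exact List.map_congr_left (fun c _ => by rw [pvGrp_getD])

theorem pvOfList_append_singleton {α : Type} [BEq α] (u : List α) (x : α) :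
    PySem.Set.ofList (u ++ [x]) = PySem.Set.add (PySem.Set.ofList u) x := by
  simp [PySem.Set.ofList, List.foldl_append]

theorem pvEnum_map_snd (l : List Char) (k : Int) :
    (PySem.List.enumerate l k).map Prod.snd = l := by
  induction l generalizing k with
  | nil => simp [PySem.List.enumerate_nil]
  | cons d t ih => rw [PySem.List.enumerate_cons]; simp [ih]

theorem pvHeadD_append (u v : List Int) (d : Int) (h : u ≠ []) :
    (u ++ v).headD d = u.headD d := by
  cases u with
  | nil => simp at h
  | cons a t => simp

theorem pvFlat_trans (ins : List String) (t0 : Nat) (b : Int) (O : List Int)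
    (H : ∀ j, j < ins.length → PySem.List.pyGet? O ((t0 : Int) + j) = some (b + pvCsum ins j)) :
    (pvFlat ins (t0 : Int)).map (fun kv => (kv.1, pvTr O kv.2))
      = (PySem.List.enumerate ((ins.map String.toList).flatten) b).map (fun ic => (ic.2, ic.1)) := by
  induction ins generalizing t0 b with
  | nil => simp [pvFlat, PySem.List.enumerate_nil]
  | cons lab t ih =>
    have h0 : PySem.List.pyGet? O (t0 : Int) = some b := by
      have := H 0 (by simp)
      simpa [pvCsum] using this
    have hrec := ih (t0 + 1) (b + lab.toList.length)
      (by
        intro j hj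
        have := H (j + 1) (by simpa using Nat.succ_lt_succ hj)
        have e1 : ((t0 : Int) + ((j + 1 : Nat) : Int)) = (((t0 + 1 : Nat) : Int) + (j : Int)) := by
          push_cast; ring
        rw [e1] at this
        rw [this]
        congr 1
        simp [pvCsum]
        ring)
    rw [show (((t0 + 1 : Nat)) : Int) = (t0 : Int) + 1 by push_cast; ring] at hrec
    simp only [pvFlat, PySem.List.enumerate_cons, List.flatMap_cons, List.map_append] at *
    rw [hrec]
    simp only [List.map_map, List.map_cons, List.map_nil, List.flatten_cons]
    rw [PySem.List.enumerate_append]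
    simp only [List.map_append]
    congr 1
    · refine Eq.trans (List.map_congr_left (fun pl _ => ?_))
        (by simpa using pvEnum_map_swap lab.toList b 0)
      simp [pvTr, h0, Function.comp]

theorem pvFind_mem (c : Char) (u v : List Char) (h : c ∈ u) :
    PySem.Chars.find (u ++ v) [c] = PySem.Chars.find u [c] := by
  rw [pvFind_eq, pvFind_eq, pvOccs_append]
  exact pvHeadD_append _ _ _ (fun he => (pvOccs_nil_iff c u 0).1 he h)

theorem pvCentral (s : List Char) (P0 : Char → Bool) :
    (PySem.List.enumerate s 0).filter
        (fun ic => (PySem.Chars.find s [ic.2] == ic.1) && P0 ic.2)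
      = ((PySem.Set.ofList s).filter P0).map (fun c => (PySem.Chars.find s [c], c)) := by
  induction s using List.reverseRecOn with
  | nil => simp [PySem.List.enumerate_nil, PySem.Set.ofList, PySem.Set.empty]
  | append_singleton u x ih =>
    have hmemFind : ∀ c ∈ u, PySem.Chars.find (u ++ [x]) [c] = PySem.Chars.find u [c] :=
      fun c hc => pvFind_mem c u [x] hc
    rw [PySem.List.enumerate_append, List.filter_append, pvOfList_append_singleton]
    have hold : (PySem.List.enumerate u 0).filter
        (fun ic => (PySem.Chars.find (u ++ [x]) [ic.2] == ic.1) && P0 ic.2)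
        = (PySem.List.enumerate u 0).filter
        (fun ic => (PySem.Chars.find u [ic.2] == ic.1) && P0 ic.2) := by
      refine List.filter_congr (fun ic hic => ?_)
      rw [hmemFind ic.2 (pvEnum_mem u 0 ic hic).1]
    rw [hold, ih]
    have hsing : PySem.List.enumerate [x] ((0 : Int) + u.length) = [((u.length : Int), x)] := by
      rw [PySem.List.enumerate_cons, PySem.List.enumerate_nil]
      norm_num
    rw [hsing]
    by_cases hx : x ∈ u
    · -- x already present: the tail entry is not a first occurrence, the dedup does not grow
      have hcont : (PySem.Set.ofList u).contains x = true := by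
        simp [List.contains_iff_mem, PySem.Set.mem_ofList, hx]
      have hlt : PySem.Chars.find (u ++ [x]) [x] ≠ (u.length : Int) := by
        rw [hmemFind x hx, pvFind_eq]
        rcases ho : pvOccs x u 0 with _ | ⟨m, r⟩
        · exact absurd ((pvOccs_nil_iff x u 0).1 ho) (by simp [hx])
        · have := pvOccs_bounds x u 0 m (by rw [ho]; exact List.mem_cons_self ..)
          simp only [List.headD_cons]
          omega
      have : ((PySem.Chars.find (u ++ [x]) [x] == (u.length : Int)) && P0 x) = false := by
        simp [hlt]
      rw [List.filter_cons, this]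
      simp only [PySem.Set.add, hcont, if_pos, List.filter_nil, List.append_nil,
        Bool.false_eq_true, if_false]
      refine List.map_congr_left (fun c hc => ?_)
      rw [hmemFind c ((PySem.Set.mem_ofList u c).1 (List.mem_of_mem_filter hc))]
    · -- x is new: it is a first occurrence and the dedup grows by x
      have hcont : (PySem.Set.ofList u).contains x = false := by
        simp [List.contains_iff_mem, PySem.Set.mem_ofList, hx]
      have hfx : PySem.Chars.find (u ++ [x]) [x] = (u.length : Int) := by
        rw [pvFind_eq, pvOccs_append, (pvOccs_nil_iff x u 0).2 hx]
        simp [pvOccs]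
      rw [List.filter_cons]
      simp only [PySem.Set.add, hcont, Bool.false_eq_true, if_false, List.filter_append,
        List.map_append, hfx, beq_self_eq_true, Bool.true_and]
      congr 1
      · refine List.map_congr_left (fun c hc => ?_)
        rw [hmemFind c ((PySem.Set.mem_ofList u c).1 (List.mem_of_mem_filter hc))]
      · by_cases hp : P0 x
        · simp [List.filter_cons, hp, hfx]
        · simp [List.filter_cons, (by simpa using hp : P0 x = false)]

theorem pvSecond (s : List Char) (c : Char) (i j : Int)
    (h : pvOccs c s 0 = [i, j]) :
    PySem.Chars.find s [c] = i ∧ PySem.Chars.findFrom s [c] (i + 1) = j := by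
  have hbi := pvOccs_bounds c s 0 i (by rw [h]; simp)
  have hbj := pvOccs_bounds c s 0 j (by rw [h]; simp)
  have hij : i < j := by
    have hp := pvOccs_pairwise c s 0
    rw [h] at hp
    simpa using (List.pairwise_cons.1 hp).1 j (by simp)
  refine ⟨by rw [pvFind_eq, h]; rfl, ?_⟩
  set n : Nat := (i + 1).toNat with hn
  have hni : (n : Int) = i + 1 := Int.toNat_of_nonneg (by omega)
  have hnlen : n ≤ s.length := by omega
  have hteq : (List.take n s).length = n := by
    simp [List.length_take]; omega
  have hsplit := pvOccs_append c (s.take n) (s.drop n) 0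
  rw [List.take_append_drop, h, hteq] at hsplit
  have hX := pvOccs_bounds c (s.take n) 0
  have hY := pvOccs_bounds c (s.drop n) (0 + (n : Int))
  have hdrop : pvOccs c (s.drop n) (0 + (n : Int)) = [j] := by
    rcases hx : pvOccs c (s.take n) 0 with _ | ⟨a, _ | ⟨b, r⟩⟩ <;> rw [hx] at hsplit
    · exfalso
      rw [List.nil_append] at hsplit
      have hiY : i ∈ pvOccs c (s.drop n) (0 + (n : Int)) := by
        rw [← hsplit]; simp
      have := hY i hiY
      omega
    · rw [List.cons_append, List.nil_append] at hsplit
      injection hsplit with h1 h2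
      exact h2.symm
    · exfalso
      have hbmem : b ∈ pvOccs c (s.take n) 0 := by rw [hx]; simp
      have hXb := hX b hbmem
      rw [hteq] at hXb
      rw [List.cons_append, List.cons_append] at hsplit
      injection hsplit with h1 h2
      injection h2 with h3 h4
      omega
  have hd0 : pvOccs c (s.drop n) 0 = [j - n] := by
    have hsh := pvOccs_shift c (s.drop n) 0 (n : Int)
    rw [hdrop] at hsh
    rcases hz : pvOccs c (s.drop n) 0 with _ | ⟨a, _ | ⟨b2, r2⟩⟩ <;> rw [hz] at hsh <;>
      simp at hsh
    simp
    omega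
  have hfd : PySem.Chars.find (s.drop n) [c] = j - n := by
    rw [pvFind_eq, hd0]; rfl
  have hff := PySem.Chars.findFrom_natCast s [c] n hnlen
  rw [hfd] at hff
  rw [← hni, hff]
  rw [if_neg (by omega : ¬(j - (n : Int)) = -1)]
  omega

theorem pvJoin_nil (L : List (List Char)) : PySem.Chars.join [] L = L.flatten := by
  induction L with
  | nil => simp [PySem.Chars.join_nil]
  | cons a t ih =>
    cases t with
    | nil => simp [PySem.Chars.join_singleton]
    | cons b t2 =>
      rw [PySem.Chars.join_cons_cons, ih]
      simp

def pvP0 (sflat o : List Char) (c : Char) : Bool :=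
  (sflat.count c == 2) && !(o.contains c)

def pvPairOf (sflat : List Char) (c : Char) : Int × Int :=
  match pvOccs c sflat 0 with
  | [i, j] => (i, j)
  | _ => (0, 0)

-- translated per-letter value lists
theorem pvVals (ins : List String) (c : Char) :
    (((pvFlat ins 0).filter (fun kv => kv.1 == c)).map Prod.snd).map (pvTr (pvOffs ins 0))
      = pvOccs c ((ins.map String.toList).flatten) 0 := by
  have hflat : (pvFlat ins 0).map (fun kv => (kv.1, pvTr (pvOffs ins 0) kv.2))
      = (PySem.List.enumerate ((ins.map String.toList).flatten) 0).map (fun ic => (ic.2, ic.1)) := by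
    have := pvFlat_trans ins 0 0 (pvOffs ins 0)
      (fun j hj => by simpa using pvOffs_get ins 0 j hj)
    simpa using this
  have h1 : (((pvFlat ins 0).filter (fun kv => kv.1 == c)).map Prod.snd).map (pvTr (pvOffs ins 0))
      = (((pvFlat ins 0).map (fun kv => (kv.1, pvTr (pvOffs ins 0) kv.2))).filter
          (fun kv => kv.1 == c)).map Prod.snd := by
    rw [List.filter_map, List.map_map, List.map_map]
    rfl
  rw [h1, hflat, List.filter_map, List.map_map]
  exact pvEnum_filter_map c _ 0

theorem pvChars (ins : List String) :
    (pvFlat ins 0).map Prod.fst = (ins.map String.toList).flatten := by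
  have hflat : (pvFlat ins 0).map (fun kv => (kv.1, pvTr (pvOffs ins 0) kv.2))
      = (PySem.List.enumerate ((ins.map String.toList).flatten) 0).map (fun ic => (ic.2, ic.1)) := by
    have := pvFlat_trans ins 0 0 (pvOffs ins 0)
      (fun j hj => by simpa using pvOffs_get ins 0 j hj)
    simpa using this
  have := congrArg (List.map Prod.fst) hflat
  simp only [List.map_map] at this
  have e1 : (Prod.fst ∘ fun kv : Char × (Int × Int) => (kv.1, pvTr (pvOffs ins 0) kv.2))
      = Prod.fst := by funext kv; rfl
  rw [e1] at this
  rw [this]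
  have e2 : (Prod.fst ∘ fun ic : Int × Char => (ic.2, ic.1)) = Prod.snd := by funext ic; rfl
  rw [e2, pvEnum_map_snd]

theorem pvA (ins : List String) (out : String) :
    parse_einsum_pairs ins out =
      (((PySem.Set.ofList ((ins.map String.toList).flatten)).filter
          (pvP0 ((ins.map String.toList).flatten) out.toList)).map
        (pvPairOf ((ins.map String.toList).flatten))) := by
  set sflat := (ins.map String.toList).flatten with hsflat
  rw [parse_einsum_pairs]
  simp only [pvLoop1 ins [] 0, List.nil_append]
  -- the occurrence dict is the grouping of the flattened stream
  have hocc : (PySem.List.enumerate ins).foldl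
      (fun occ ti =>
        (PySem.List.enumerate ti.2.toList).foldl
          (fun occ pl => occ.insert pl.2 (occ.getD pl.2 [] ++ [(ti.1, pl.1)])) occ)
      PySem.Dict.empty = pvGrp (pvFlat ins 0) := by
    rw [pvGrp, pvFlat, List.foldl_flatMap]
    simp only [List.foldl_map]
  rw [hocc, pvGrp_items, List.foldl_map, pvChars]
  -- pointwise, A's step is the canonical dedup-order step
  have hstep : ∀ (pairs : List (Int × Int)) (c : Char),
      (if (((pvFlat ins 0).filter (fun kv => kv.1 == c)).map Prod.snd).length == 2
            && !(PySem.Chars.isIn [c] out.toList) then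
        match ((pvFlat ins 0).filter (fun kv => kv.1 == c)).map Prod.snd with
        | [(t1, p1), (t2, p2)] =>
            pairs ++ [((PySem.List.pyGet? (pvOffs ins 0) t1).getD 0 + p1,
                       (PySem.List.pyGet? (pvOffs ins 0) t2).getD 0 + p2)]
        | _ => pairs
      else pairs)
      = (if pvP0 sflat out.toList c then pairs ++ [pvPairOf sflat c] else pairs) := by
    intro pairs c
    have hv := pvVals ins c
    have hlen : (((pvFlat ins 0).filter (fun kv => kv.1 == c)).map Prod.snd).length
        = sflat.count c := by
      rw [← pvOccs_length c sflat 0, ← hv]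
      simp
    have hcond : ((((pvFlat ins 0).filter (fun kv => kv.1 == c)).map Prod.snd).length == 2
          && !(PySem.Chars.isIn [c] out.toList)) = pvP0 sflat out.toList c := by
      rw [hlen, pvIsIn_eq, pvP0]
    rw [hcond]
    by_cases hp : pvP0 sflat out.toList c
    · rw [if_pos hp, if_pos hp]
      have hc2 : sflat.count c = 2 := by
        have h' := hp
        simp only [pvP0, Bool.and_eq_true, beq_iff_eq] at h'
        exact h'.1
      have hlen2 : (((pvFlat ins 0).filter (fun kv => kv.1 == c)).map Prod.snd).length = 2 := by
        rw [hlen, hc2]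
      rcases hvv : ((pvFlat ins 0).filter (fun kv => kv.1 == c)).map Prod.snd with
        _ | ⟨⟨t1, p1⟩, _ | ⟨⟨t2, p2⟩, r⟩⟩ <;> rw [hvv] at hlen2 <;> simp at hlen2
      · have hr : r = [] := by simpa using hlen2
        subst hr
        rw [hvv] at hv
        simp only [List.map_cons, List.map_nil] at hv
        rw [hvv, pvPairOf, ← hv]
        rfl
    · rw [if_neg hp, if_neg hp]
  have : ∀ (init : List (Int × Int)),
      (PySem.Set.ofList sflat).foldl
        (fun pairs c =>
          if (((pvFlat ins 0).filter (fun kv => kv.1 == c)).map Prod.snd).length == 2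
              && !(PySem.Chars.isIn [c] out.toList) then
            match ((pvFlat ins 0).filter (fun kv => kv.1 == c)).map Prod.snd with
            | [(t1, p1), (t2, p2)] =>
                pairs ++ [((PySem.List.pyGet? (pvOffs ins 0) t1).getD 0 + p1,
                          (PySem.List.pyGet? (pvOffs ins 0) t2).getD 0 + p2)]
            | _ => pairs
          else pairs) init
      = init ++ ((PySem.Set.ofList sflat).filter (pvP0 sflat out.toList)).map (pvPairOf sflat) := by
    intro init
    have he : (fun (pairs : List (Int × Int)) (c : Char) =>
        if (((pvFlat ins 0).filter (fun kv => kv.1 == c)).map Prod.snd).length == 2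
            && !(PySem.Chars.isIn [c] out.toList) then
          match ((pvFlat ins 0).filter (fun kv => kv.1 == c)).map Prod.snd with
          | [(t1, p1), (t2, p2)] =>
              pairs ++ [((PySem.List.pyGet? (pvOffs ins 0) t1).getD 0 + p1,
                        (PySem.List.pyGet? (pvOffs ins 0) t2).getD 0 + p2)]
          | _ => pairs
        else pairs)
        = (fun pairs c => if pvP0 sflat out.toList c then pairs ++ [pvPairOf sflat c] else pairs) := by
      funext pairs c
      exact hstep pairs c
    rw [he, PySem.List.foldl_append_if]
  simpa using this []

theorem pvB (ins : List String) (out : String) :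
    parse_einsum_pairs_alt ins out =
      (((PySem.Set.ofList ((ins.map String.toList).flatten)).filter
          (pvP0 ((ins.map String.toList).flatten) out.toList)).map
        (pvPairOf ((ins.map String.toList).flatten))) := by
  set sflat := (ins.map String.toList).flatten with hsflat
  rw [parse_einsum_pairs_alt]
  have hJ : (PySem.Str.join "" ins).toList = sflat := by
    rw [PySem.Str.toList_join]
    simpa using pvJoin_nil (ins.map String.toList)
  rw [hJ]
  have he : (fun (pairs : List (Int × Int)) (ic : Int × Char) =>
      if (PySem.Chars.find sflat [ic.2] == ic.1) && (PySem.Chars.count sflat [ic.2] == 2)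
          && !(PySem.Chars.isIn [ic.2] out.toList) then
        pairs ++ [(ic.1, PySem.Chars.findFrom sflat [ic.2] (ic.1 + 1))]
      else pairs)
      = (fun pairs ic =>
        if ((PySem.Chars.find sflat [ic.2] == ic.1) && pvP0 sflat out.toList ic.2) then
          pairs ++ [(ic.1, PySem.Chars.findFrom sflat [ic.2] (ic.1 + 1))]
        else pairs) := by
    funext pairs ic
    rw [pvCount_eq, pvIsIn_eq, pvP0, Bool.and_assoc]
  rw [he, PySem.List.foldl_append_if, pvCentral sflat (pvP0 sflat out.toList), List.map_map,
    List.nil_append]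
  refine List.map_congr_left (fun c hc => ?_)
  have hp : pvP0 sflat out.toList c = true := List.of_mem_filter hc
  have hc2 : sflat.count c = 2 := by
    simp only [pvP0, Bool.and_eq_true, beq_iff_eq] at hp
    exact hp.1
  have hlen2 : (pvOccs c sflat 0).length = 2 := by rw [pvOccs_length, hc2]
  rcases ho : pvOccs c sflat 0 with _ | ⟨i, _ | ⟨j, r⟩⟩ <;> rw [ho] at hlen2 <;> simp at hlen2
  have hr : r = [] := by simpa using hlen2
  subst hr
  obtain ⟨hfind, hfrom⟩ := pvSecond sflat c i j ho
  simp only [Function.comp_apply, hfind, hfrom, pvPairOf, ho]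

-- ===== VERDICT (by name: the statement is the Claim_ definition above) =====
theorem parse_einsum_pairs_spec : Claim_equal_parse_einsum_pairs := by
  intro input_notations output_notation _
  unfold Spec_parse_einsum_pairs
  rw [pvA, pvB]
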